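-- pv_equiv track=rewrite | github.com/shivang-arora/Gate_qbm | qbmqsp/utils.py | construct_multi_fcqbm_pauli_strings
-- ===== SOURCE A (Python) =====
-- def construct_multi_fcqbm_pauli_strings(n: int) -> list[str]:
--     """Same as construct_fcqbm_pauli_strings but add multi-qubit interactions."""
--     h = list()
--     for p in ['X', 'Y', 'Z']:
--
--         for i in range(n):
--             pauli_string = list(n * 'I')
--             pauli_string[i] = p
--             h.append(''.join(pauli_string))
--
--             for j in range(i + 1, n):
--                 pauli_string = list(n * 'I')
--                 pauli_string[i] = pauli_string[j] = p
--                 h.append(''.join(pauli_string))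
--
--                 for k in range(j + 1, n):
--                     pauli_string = list(n * 'I')
--                     pauli_string[i] = pauli_string[j] = pauli_string[k] = p
--                     h.append(''.join(pauli_string))
--     return h
-- ===== SOURCE B (Python) =====
-- def _pauli(n, p, chosen):
--     """The Pauli string with p at the chosen positions, built from 'I'*k runs."""
--     parts = []
--     prev = 0
--     for i in chosen:
--         parts.append('I' * (i - prev))
--         parts.append(p)
--         prev = i + 1
--     parts.append('I' * (n - prev))
--     return ''.join(parts)
--
--
-- def _rec(n, h, p, chosen, start):
--     """DFS over small index subsets: emit chosen, then extend it."""
--     if chosen: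
--         h.append(_pauli(n, p, chosen))
--     if len(chosen) < 3:
--         for i in range(start, n):
--             _rec(n, h, p, chosen + [i], i + 1)
--
--
-- def construct_multi_fcqbm_pauli_strings(n: int) -> list[str]:
--     """Same result as A: bounded recursion over chosen index subsets, same DFS order."""
--     h = []
--     for p in ['X', 'Y', 'Z']:
--         _rec(n, h, p, [], 0)
--     return h
-- ===== Notes on version B (the rewrite author's own statement) =====
-- stated objective: simpler
-- what changed: Replaced A's hand-written triple-nested index loops (each rebuilding the whole string by list assignment) by one bounded recursion over chosen index subsets, emitting in the same DFS order and assembling each string from runs of identity characters.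
import Mathlib
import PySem

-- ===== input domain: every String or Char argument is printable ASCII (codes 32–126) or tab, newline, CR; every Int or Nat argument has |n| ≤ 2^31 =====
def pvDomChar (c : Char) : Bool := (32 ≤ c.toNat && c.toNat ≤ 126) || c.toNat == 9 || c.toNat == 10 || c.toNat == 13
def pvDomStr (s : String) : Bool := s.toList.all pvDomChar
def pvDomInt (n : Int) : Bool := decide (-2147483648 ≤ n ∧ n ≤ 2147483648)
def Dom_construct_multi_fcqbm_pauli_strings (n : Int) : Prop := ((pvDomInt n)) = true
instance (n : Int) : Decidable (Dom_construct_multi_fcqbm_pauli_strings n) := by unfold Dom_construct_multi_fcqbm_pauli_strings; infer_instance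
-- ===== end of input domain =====

-- B replaces A's three hand-written nested index loops by one bounded recursion over index
-- subsets (same DFS order), assembling each string from 'I'-run segments; objective: simpler.

-- ===== PORT A =====
-- literal port: `list(n * 'I')` is `List.replicate n.toNat 'I'`, item assignment is `List.set`
def construct_multi_fcqbm_pauli_strings (n : Int) : List String :=
  (['X', 'Y', 'Z'] : List Char).foldl (fun h p =>
    (PySem.List.pyRange 0 n 1).foldl (fun h i =>
      let h := h ++ [String.ofList ((List.replicate n.toNat 'I').set i.toNat p)]
      (PySem.List.pyRange (i + 1) n 1).foldl (fun h j =>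
        let h := h ++ [String.ofList (((List.replicate n.toNat 'I').set i.toNat p).set j.toNat p)]
        (PySem.List.pyRange (j + 1) n 1).foldl (fun h k =>
          h ++ [String.ofList ((((List.replicate n.toNat 'I').set i.toNat p).set j.toNat p).set k.toNat p)])
          h) h) h) []

-- ===== PORT B =====
-- pauli(p, chosen): parts of 'I'-runs ('I' * k is List.replicate k.toNat) around the chosen
-- positions, then ''.join(parts) (= flatten); state = (parts, prev)
def pvPauli (n : Int) (p : Char) (chosen : List Int) : String :=
  let st := chosen.foldl (fun (st : List (List Char) × Int) i =>
      (st.1 ++ [List.replicate (i - st.2).toNat 'I', [p]], i + 1)) ([], 0)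
  String.ofList (st.1 ++ [List.replicate (n - st.2).toNat 'I']).flatten

-- the inner recursion `rec(p, chosen, start)`; the accumulator h is threaded explicitly
def pvRec (n : Int) (p : Char) (chosen : List Int) (start : Int) (h : List String) : List String :=
  let h := if chosen ≠ [] then h ++ [pvPauli n p chosen] else h
  if hlt : chosen.length < 3 then
    (PySem.List.pyRange start n 1).foldl
      (fun h i => pvRec n p (chosen ++ [i]) (i + 1) h) h
  else h
termination_by 3 - chosen.length
decreasing_by simp; omega

def construct_multi_fcqbm_pauli_strings_alt (n : Int) : List String :=
  (['X', 'Y', 'Z'] : List Char).foldl (fun h p => pvRec n p [] 0 h) []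

-- ===== PRECONDITION & SPEC =====
def Spec_construct_multi_fcqbm_pauli_strings (n : Int) (out : List String) : Prop := out = construct_multi_fcqbm_pauli_strings_alt n
instance (n : Int) (out : List String) : Decidable (Spec_construct_multi_fcqbm_pauli_strings n out) := by unfold Spec_construct_multi_fcqbm_pauli_strings; infer_instance

-- ===== CLAIM (what is proved, stated in full; the proofs are below) =====
def Claim_equal_construct_multi_fcqbm_pauli_strings : Prop := ∀ (n : Int), Dom_construct_multi_fcqbm_pauli_strings n → Spec_construct_multi_fcqbm_pauli_strings n (construct_multi_fcqbm_pauli_strings n)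

-- ===== LEMMAS AND PROOFS =====

-- setting one position of an 'I'-run splits it into two runs around the written char
theorem pvSetRep (m t : Nat) (p : Char) (ht : t < m) :
    (List.replicate m 'I').set t p
      = List.replicate t 'I' ++ p :: List.replicate (m - (t + 1)) 'I' := by
  rw [List.set_eq_take_cons_drop p (by simpa using ht)]
  simp [List.take_replicate, List.drop_replicate, Nat.min_eq_left (Nat.le_of_lt ht)]

-- setting past a fixed prefix u acts on the trailing run only
theorem pvSetStep (u : List Char) (c t : Nat) (p : Char) (ht : t < c) :
    (u ++ List.replicate c 'I').set (u.length + t) p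
      = u ++ List.replicate t 'I' ++ p :: List.replicate (c - (t + 1)) 'I' := by
  rw [List.set_append_right _ _ (by omega)]
  have h1 : u.length + t - u.length = t := by omega
  rw [h1, pvSetRep c t p ht]
  simp

theorem pvPauli1 (n i : Int) (p : Char) (h0 : 0 ≤ i) (h1 : i < n) :
    String.ofList ((List.replicate n.toNat 'I').set i.toNat p) = pvPauli n p [i] := by
  have c1 : (n - (i + 1)).toNat = n.toNat - (i.toNat + 1) := by omega
  rw [pvSetRep n.toNat i.toNat p (by omega)]
  simp [pvPauli, c1]

theorem pvPauli2 (n i j : Int) (p : Char) (h0 : 0 ≤ i) (h1 : i < j) (h2 : j < n) :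
    String.ofList (((List.replicate n.toNat 'I').set i.toNat p).set j.toNat p)
      = pvPauli n p [i, j] := by
  rw [pvSetRep n.toNat i.toNat p (by omega)]
  have hu : (List.replicate i.toNat 'I' ++ p :: List.replicate (n.toNat - (i.toNat + 1)) 'I')
      = (List.replicate i.toNat 'I' ++ [p]) ++ List.replicate (n.toNat - (i.toNat + 1)) 'I' := by
    simp
  rw [hu]
  have hj : j.toNat = (List.replicate i.toNat 'I' ++ [p]).length + (j.toNat - (i.toNat + 1)) := by
    simp; omega
  rw [hj, pvSetStep _ _ _ p (by omega)]
  have c1 : (j - (i + 1)).toNat = j.toNat - (i.toNat + 1) := by omega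
  have c2 : (n - (j + 1)).toNat = n.toNat - (i.toNat + 1) - (j.toNat - (i.toNat + 1) + 1) := by omega
  simp [pvPauli, c1, c2]

theorem pvPauli3 (n i j k : Int) (p : Char) (h0 : 0 ≤ i) (h1 : i < j) (h2 : j < k) (h3 : k < n) :
    String.ofList ((((List.replicate n.toNat 'I').set i.toNat p).set j.toNat p).set k.toNat p)
      = pvPauli n p [i, j, k] := by
  rw [pvSetRep n.toNat i.toNat p (by omega)]
  have hu : (List.replicate i.toNat 'I' ++ p :: List.replicate (n.toNat - (i.toNat + 1)) 'I')
      = (List.replicate i.toNat 'I' ++ [p]) ++ List.replicate (n.toNat - (i.toNat + 1)) 'I' := by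
    simp
  rw [hu]
  have hj : j.toNat = (List.replicate i.toNat 'I' ++ [p]).length + (j.toNat - (i.toNat + 1)) := by
    simp; omega
  rw [hj, pvSetStep _ _ _ p (by omega)]
  have hu2 : (List.replicate i.toNat 'I' ++ [p]) ++ List.replicate (j.toNat - (i.toNat + 1)) 'I'
        ++ p :: List.replicate (n.toNat - (i.toNat + 1) - (j.toNat - (i.toNat + 1) + 1)) 'I'
      = ((List.replicate i.toNat 'I' ++ [p]) ++ List.replicate (j.toNat - (i.toNat + 1)) 'I' ++ [p])
        ++ List.replicate (n.toNat - (i.toNat + 1) - (j.toNat - (i.toNat + 1) + 1)) 'I' := by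
    simp
  rw [hu2]
  have hk : k.toNat = ((List.replicate i.toNat 'I' ++ [p]) ++ List.replicate (j.toNat - (i.toNat + 1)) 'I' ++ [p]).length
      + (k.toNat - (j.toNat + 1)) := by
    simp; omega
  rw [hk, pvSetStep _ _ _ p (by omega)]
  have c1 : (j - (i + 1)).toNat = j.toNat - (i.toNat + 1) := by omega
  have c2 : (k - (j + 1)).toNat = k.toNat - (j.toNat + 1) := by omega
  have c3 : (n - (k + 1)).toNat
      = n.toNat - (i.toNat + 1) - (j.toNat - (i.toNat + 1) + 1) - (k.toNat - (j.toNat + 1) + 1) := by omega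
  simp [pvPauli, c1, c2, c3]

-- unfolding pvRec at each depth
theorem pvRec0 (n : Int) (p : Char) (h : List String) :
    pvRec n p [] 0 h = (PySem.List.pyRange 0 n 1).foldl (fun h i => pvRec n p [i] (i + 1) h) h := by
  rw [pvRec]; simp

theorem pvRec3 (n : Int) (p : Char) (i j k s : Int) (h : List String) :
    pvRec n p [i, j, k] s h = h ++ [pvPauli n p [i, j, k]] := by
  rw [pvRec]; simp

theorem pvRec2 (n : Int) (p : Char) (i j : Int) (h : List String) :
    pvRec n p [i, j] (j + 1) h
      = (PySem.List.pyRange (j + 1) n 1).foldl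
          (fun h k => h ++ [pvPauli n p [i, j, k]])
          (h ++ [pvPauli n p [i, j]]) := by
  rw [pvRec]; simp [pvRec3]

theorem pvRec1 (n : Int) (p : Char) (i : Int) (h : List String) :
    pvRec n p [i] (i + 1) h
      = (PySem.List.pyRange (i + 1) n 1).foldl
          (fun h j => (PySem.List.pyRange (j + 1) n 1).foldl
              (fun h k => h ++ [pvPauli n p [i, j, k]])
              (h ++ [pvPauli n p [i, j]]))
          (h ++ [pvPauli n p [i]]) := by
  rw [pvRec]; simp [pvRec2]

-- per-Pauli agreement of A's triple loop with B's recursion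
theorem pvPerP (n : Int) (p : Char) (h : List String) :
    (PySem.List.pyRange 0 n 1).foldl (fun h i =>
      (PySem.List.pyRange (i + 1) n 1).foldl (fun h j =>
        (PySem.List.pyRange (j + 1) n 1).foldl (fun h k =>
          h ++ [String.ofList ((((List.replicate n.toNat 'I').set i.toNat p).set j.toNat p).set k.toNat p)])
          (h ++ [String.ofList (((List.replicate n.toNat 'I').set i.toNat p).set j.toNat p)]))
        (h ++ [String.ofList ((List.replicate n.toNat 'I').set i.toNat p)])) h
      = pvRec n p [] 0 h := by
  rw [pvRec0]
  apply PySem.List.foldl_congr_mem'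
  intro i hi h
  obtain ⟨hi0, hin⟩ := (PySem.List.mem_pyRange_one).1 hi
  rw [pvRec1, pvPauli1 n i p hi0 hin]
  apply PySem.List.foldl_congr_mem'
  intro j hj h
  obtain ⟨hj0, hjn⟩ := (PySem.List.mem_pyRange_one).1 hj
  rw [pvPauli2 n i j p hi0 (by omega) hjn]
  apply PySem.List.foldl_congr_mem'
  intro k hk h
  obtain ⟨hk0, hkn⟩ := (PySem.List.mem_pyRange_one).1 hk
  rw [pvPauli3 n i j k p hi0 (by omega) (by omega) hkn]

-- ===== VERDICT (by name: the statement is the Claim_ definition above) =====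
theorem construct_multi_fcqbm_pauli_strings_spec : Claim_equal_construct_multi_fcqbm_pauli_strings := by
  intro n _
  unfold Spec_construct_multi_fcqbm_pauli_strings
  unfold construct_multi_fcqbm_pauli_strings construct_multi_fcqbm_pauli_strings_alt
  simp only [List.foldl_cons, List.foldl_nil]
  rw [pvPerP, pvPerP, pvPerP]
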